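-- pv_equiv track=rewrite | github.com/BrettRey/erdos-problem-993 | ecms_remote_families.py | make_double_star
-- ===== SOURCE A (Python) =====
-- def make_double_star(a, b):
--     """Double star S(a,b): centers 0,1 connected, a leaves on 0, b leaves on 1."""
--     n = a + b + 2
--     adj = [[] for _ in range(n)]
--     adj[0].append(1)
--     adj[1].append(0)
--     for i in range(2, 2 + a):
--         adj[0].append(i)
--         adj[i].append(0)
--     for i in range(2 + a, n):
--         adj[1].append(i)
--         adj[i].append(1)
--     return n, adj
-- ===== SOURCE B (Python) =====
-- def make_double_star(a, b):
--     """Double star S(a,b): centers 0,1 connected, a leaves on 0, b leaves on 1."""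
--     n = a + b + 2
--
--     def neighbors(v):
--         if v == 0:
--             return [1] + list(range(2, 2 + a))
--         if v == 1:
--             return [0] + list(range(2 + a, n))
--         return [0] if v < 2 + a else [1]
--
--     return n, [neighbors(v) for v in range(n)]
-- ===== Notes on version B (the rewrite author's own statement) =====
-- stated objective: alternative
-- what changed: Replaced A's mutating build (allocate empty lists, then append both endpoints of every edge across three passes) with a mutation-free single comprehension that computes each vertex's full neighbor list directly from a closed-form rule.
-- outside the precondition, e.g. on make_double_star(-1, 1): A returns (2, [[1], [0, 1, 1]]), B returns (2, [[1], [0, 1]]); on make_double_star(0, -1): A raises IndexError, B returns (1, [[1]])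
import Mathlib
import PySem

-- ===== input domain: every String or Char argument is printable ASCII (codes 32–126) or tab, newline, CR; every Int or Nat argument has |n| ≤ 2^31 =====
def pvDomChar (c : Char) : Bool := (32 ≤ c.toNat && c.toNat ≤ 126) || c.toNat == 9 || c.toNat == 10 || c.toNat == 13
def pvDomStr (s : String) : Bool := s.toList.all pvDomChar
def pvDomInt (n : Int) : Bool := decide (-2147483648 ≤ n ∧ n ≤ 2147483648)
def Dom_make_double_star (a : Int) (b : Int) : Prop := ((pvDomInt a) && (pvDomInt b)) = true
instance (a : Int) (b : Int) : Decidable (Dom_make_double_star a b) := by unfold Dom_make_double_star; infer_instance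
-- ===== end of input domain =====

-- B computes each vertex's neighbor list directly by a closed-form rule instead of A's three append passes; return value only.

-- ===== PORT A =====
-- adj[i].append(v): exact Python list indexing under Pre_'s in-range guarantee
def appendAt (adj : List (List Int)) (i : Int) (v : Int) : List (List Int) :=
  PySem.List.pySetD adj i (PySem.List.pyGetD adj i [] ++ [v])

def make_double_star (a : Int) (b : Int) : Int × List (List Int) :=
  let n := a + b + 2
  let adj := (PySem.List.pyRange 0 n 1).map (fun _ => ([] : List Int))
  let adj := appendAt adj 0 1
  let adj := appendAt adj 1 0
  let adj := (PySem.List.pyRange 2 (2 + a) 1).foldl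
      (fun adj i => appendAt (appendAt adj 0 i) i 0) adj
  let adj := (PySem.List.pyRange (2 + a) n 1).foldl
      (fun adj i => appendAt (appendAt adj 1 i) i 1) adj
  (n, adj)

-- ===== PORT B =====
def dsNeighbors (a : Int) (n : Int) (v : Int) : List Int :=
  if v = 0 then 1 :: PySem.List.pyRange 2 (2 + a) 1
  else if v = 1 then 0 :: PySem.List.pyRange (2 + a) n 1
  else if v < 2 + a then [0] else [1]

def make_double_star_alt (a : Int) (b : Int) : Int × List (List Int) :=
  let n := a + b + 2
  (n, (PySem.List.pyRange 0 n 1).map (dsNeighbors a n))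

-- ===== PRECONDITION & SPEC =====
-- Pre_ is the function's natural domain, nonnegative leaf counts; outside it A either raises
-- IndexError or returns values shaped by negative-index wraparound and empty-range accidents.
def Pre_make_double_star (a : Int) (b : Int) : Prop := 0 ≤ a ∧ 0 ≤ b
instance (a : Int) (b : Int) : Decidable (Pre_make_double_star a b) := by
  unfold Pre_make_double_star; infer_instance
def pvWitness_make_double_star : Int × Int := (2, 3)

def Spec_make_double_star (a : Int) (b : Int) (out : Int × List (List Int)) : Prop :=
  out = make_double_star_alt a b
instance (a : Int) (b : Int) (out : Int × List (List Int)) : Decidable (Spec_make_double_star a b out) := by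
  unfold Spec_make_double_star; infer_instance

-- ===== CLAIM =====
def Claim_equal_make_double_star : Prop :=
  ∀ (a : Int) (b : Int), Dom_make_double_star a b → Pre_make_double_star a b →
    Spec_make_double_star a b (make_double_star a b)

-- ===== LEMMAS AND PROOFS =====

lemma appendAt_natCast (adj : List (List Int)) (m : Nat) (v : Int) :
    appendAt adj ((m : Nat) : Int) v = adj.set m (adj.getD m [] ++ [v]) := by
  simp [appendAt, List.getD]

lemma appendAt_zero (r0 : List Int) (rest : List (List Int)) (v : Int) :
    appendAt (r0 :: rest) 0 v = (r0 ++ [v]) :: rest := by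
  have h := appendAt_natCast (r0 :: rest) 0 v
  simpa using h

lemma appendAt_one (r0 r1 : List Int) (rest : List (List Int)) (v : Int) :
    appendAt (r0 :: r1 :: rest) 1 v = r0 :: (r1 ++ [v]) :: rest := by
  have h := appendAt_natCast (r0 :: r1 :: rest) 1 v
  simpa using h

lemma appendAt_two_add (r0 r1 : List Int) (rest : List (List Int)) (k : Nat) (v : Int) :
    appendAt (r0 :: r1 :: rest) (2 + (k : Int)) v
      = r0 :: r1 :: rest.set k (rest.getD k [] ++ [v]) := by
  have h := appendAt_natCast (r0 :: r1 :: rest) (k + 2) v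
  rw [show (2 + (k : Int)) = ((k + 2 : Nat) : Int) by push_cast; ring, h]
  simp [show k + 2 = (k + 1) + 1 from rfl, List.getD]

lemma mid_getD {α : Type} (xs : List α) (b : α) (l : List α) (d : α) (n : Nat)
    (hn : n = xs.length) : (xs ++ b :: l).getD n d = b := by
  subst hn
  simp [List.getD]

lemma mid_set {α : Type} (xs : List α) (b v : α) (l : List α) (n : Nat)
    (hn : n = xs.length) : (xs ++ b :: l).set n v = xs ++ v :: l := by
  subst hn
  induction xs with
  | nil => simp
  | cons x xs ih => simp [ih]

lemma map_const_mem {α β : Type} (l : List α) (f : α → β) (c : β)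
    (h : ∀ x ∈ l, f x = c) : l.map f = List.replicate l.length c := by
  induction l with
  | nil => simp
  | cons x xs ih =>
      simp only [List.map_cons, List.length_cons, List.replicate_succ]
      rw [h x (by simp), ih (fun y hy => h y (by simp [hy]))]

lemma loop1 (p q k : Nat) (hk : k ≤ p) :
    (PySem.List.pyRange 2 (2 + (k : Int)) 1).foldl
        (fun adj i => appendAt (appendAt adj 0 i) i 0)
        ([1] :: [0] :: List.replicate (p + q) []) =
      (1 :: PySem.List.pyRange 2 (2 + (k : Int)) 1) :: [0]
        :: (List.replicate k [0] ++ List.replicate (p + q - k) []) := by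
  induction k with
  | zero => simp [PySem.List.pyRange_one_eq_nil]
  | succ k ih =>
      have hsplit : (2 + ((k+1 : Nat) : Int)) = (2 + (k : Int)) + 1 := by push_cast; ring
      rw [hsplit, PySem.List.pyRange_one_succ_right (by omega), List.foldl_append,
        ih (by omega)]
      simp only [List.foldl_cons, List.foldl_nil]
      rw [appendAt_zero, appendAt_two_add]
      rw [show List.replicate (p + q - k) ([] : List Int)
            = ([] : List Int) :: List.replicate (p + q - (k+1)) [] by
          rw [show p + q - k = (p + q - (k+1)) + 1 by omega, List.replicate_succ]]
      rw [mid_getD _ _ _ _ k (by simp), mid_set _ _ _ _ k (by simp)]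
      simp [List.replicate_succ', List.append_assoc]

lemma loop2 (p q j : Nat) (hj : j ≤ q) :
    (PySem.List.pyRange (2 + (p : Int)) (2 + (p : Int) + (j : Int)) 1).foldl
        (fun adj i => appendAt (appendAt adj 1 i) i 1)
        ((1 :: PySem.List.pyRange 2 (2 + (p : Int)) 1) :: [0]
          :: (List.replicate p [0] ++ List.replicate q [])) =
      (1 :: PySem.List.pyRange 2 (2 + (p : Int)) 1)
        :: (0 :: PySem.List.pyRange (2 + (p : Int)) (2 + (p : Int) + (j : Int)) 1)
        :: (List.replicate p [0] ++ List.replicate j [1] ++ List.replicate (q - j) []) := by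
  induction j with
  | zero => simp [PySem.List.pyRange_one_eq_nil]
  | succ j ih =>
      have hsplit : (2 + (p : Int) + ((j+1 : Nat) : Int)) = (2 + (p : Int) + (j : Int)) + 1 := by
        push_cast; ring
      rw [hsplit, PySem.List.pyRange_one_succ_right (by omega), List.foldl_append,
        ih (by omega)]
      simp only [List.foldl_cons, List.foldl_nil]
      rw [appendAt_one]
      rw [show (2 + (p : Int) + (j : Int)) = 2 + ((p + j : Nat) : Int) by push_cast; ring]
      rw [appendAt_two_add]
      rw [show List.replicate (q - j) ([] : List Int)
            = ([] : List Int) :: List.replicate (q - (j+1)) [] by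
          rw [show q - j = (q - (j+1)) + 1 by omega, List.replicate_succ]]
      rw [mid_getD _ _ _ _ (p + j) (by simp), mid_set _ _ _ _ (p + j) (by simp)]
      simp [List.replicate_succ', List.append_assoc]

-- ===== VERDICT =====
theorem make_double_star_spec : Claim_equal_make_double_star := by
  intro a b _ hpre
  obtain ⟨ha, hb⟩ := hpre
  obtain ⟨p, rfl⟩ := Int.eq_ofNat_of_zero_le ha
  obtain ⟨q, rfl⟩ := Int.eq_ofNat_of_zero_le hb
  simp only [Spec_make_double_star, make_double_star, make_double_star_alt]
  -- initial adjacency: n empty rows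
  have hinit : (PySem.List.pyRange 0 ((p : Int) + (q : Int) + 2) 1).map (fun _ => ([] : List Int))
      = ([] : List Int) :: ([] : List Int) :: List.replicate (p + q) [] := by
    rw [map_const_mem _ _ ([] : List Int) (fun _ _ => rfl), PySem.List.length_pyRange_one,
      show (((p : Int) + (q : Int) + 2) - 0).toNat = ((p + q) + 1) + 1 by omega,
      List.replicate_succ, List.replicate_succ]
  rw [hinit, appendAt_zero, appendAt_one]
  simp only [List.nil_append]
  rw [loop1 p q p (Nat.le_refl p),
    show List.replicate (p + q - p) ([] : List Int) = List.replicate q [] by congr 1; omega,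
    show ((p : Int) + (q : Int) + 2) = 2 + (p : Int) + (q : Int) by ring,
    loop2 p q q (Nat.le_refl q)]
  -- B side
  have hB : (PySem.List.pyRange 0 (2 + (p : Int) + (q : Int)) 1).map
        (dsNeighbors (p : Int) (2 + (p : Int) + (q : Int)))
      = dsNeighbors (p:Int) (2 + (p : Int) + (q : Int)) 0
          :: dsNeighbors (p:Int) (2 + (p : Int) + (q : Int)) 1
          :: (PySem.List.pyRange 2 (2 + (p : Int) + (q : Int)) 1).map
              (dsNeighbors (p:Int) (2 + (p : Int) + (q : Int))) := by
    rw [PySem.List.pyRange_one_cons (by omega), PySem.List.pyRange_one_cons (by omega)]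
    norm_num
  rw [hB,
    PySem.List.pyRange_one_append 2 (2 + (p:Int)) (2 + (p : Int) + (q : Int))
      (by omega) (by omega),
    List.map_append]
  have hmap0 : (PySem.List.pyRange 2 (2 + (p:Int)) 1).map
        (dsNeighbors (p:Int) (2 + (p : Int) + (q : Int)))
      = List.replicate p ([0] : List Int) := by
    rw [map_const_mem _ _ ([0] : List Int) ?_]
    · rw [PySem.List.length_pyRange_one]; congr 1; omega
    · intro x hx
      rw [PySem.List.mem_pyRange_one] at hx
      simp [dsNeighbors, show x ≠ 0 by omega, show x ≠ 1 by omega, show x < 2 + (p:Int) from hx.2]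
  have hmap1 : (PySem.List.pyRange (2 + (p:Int)) (2 + (p : Int) + (q : Int)) 1).map
        (dsNeighbors (p:Int) (2 + (p : Int) + (q : Int)))
      = List.replicate q ([1] : List Int) := by
    rw [map_const_mem _ _ ([1] : List Int) ?_]
    · rw [PySem.List.length_pyRange_one]; congr 1; omega
    · intro x hx
      rw [PySem.List.mem_pyRange_one] at hx
      simp [dsNeighbors, show x ≠ 0 by omega, show x ≠ 1 by omega, show ¬ x < 2 + (p:Int) by omega]
  rw [hmap0, hmap1]
  simp [dsNeighbors]
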